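-- pv_equiv track=rewrite | github.com/mataeo-eh/SC2-gamestate-extractor | src_new/extractors/upgrade_extractor.py | get_upgrade_summary
-- ===== SOURCE A (Python) =====
-- from typing import Dict, List, Set, Tuple, Optional
--
-- def get_upgrade_summary(upgrades_data: Dict[str, Dict]) -> str:
--     """
--     Get a human-readable summary of upgrades.
--
--     Args:
--         upgrades_data: Output from extract()
--
--     Returns:
--         Formatted string summary
--
--     Example:
--         "3 upgrades (Weapons: 1, Armor: 1, Other: 1)"
--     """
--     if not upgrades_data:
--         return "No upgrades completed"
--
--     # Count by category
--     category_counts: Dict[str, int] = {}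
--     for upgrade_data in upgrades_data.values():
--         category = upgrade_data['category']
--         category_counts[category] = category_counts.get(category, 0) + 1
--
--     total = len(upgrades_data)
--     categories_str = ", ".join([f"{cat.capitalize()}: {count}"
--                                for cat, count in sorted(category_counts.items())])
--
--     return f"{total} upgrades ({categories_str})"
-- ===== SOURCE B (Python) =====
-- def get_upgrade_summary(upgrades_data):
--     """Sort-then-group: sort all category strings, then one linear scan over
--     the sorted list emits each maximal run as 'Cat: runlength'."""
--     if not upgrades_data:
--         return "No upgrades completed"
--     cats = sorted(u['category'] for u in upgrades_data.values())
--     n = len(cats)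
--     parts = []
--     i = 0
--     while i < n:
--         j = i + 1
--         while j < n and cats[j] == cats[i]:
--             j += 1
--         parts.append(f"{cats[i].capitalize()}: {j - i}")
--         i = j
--     return f"{n} upgrades ({', '.join(parts)})"
-- ===== Notes on version B (the rewrite author's own statement) =====
-- stated objective: alternative
-- what changed: Replaces the hash-count-then-sort-items strategy with sort-then-group: sort the category list once, then a single index scan over the sorted list finds each maximal run and emits its length, with no counting dict at all.
import Mathlib
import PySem

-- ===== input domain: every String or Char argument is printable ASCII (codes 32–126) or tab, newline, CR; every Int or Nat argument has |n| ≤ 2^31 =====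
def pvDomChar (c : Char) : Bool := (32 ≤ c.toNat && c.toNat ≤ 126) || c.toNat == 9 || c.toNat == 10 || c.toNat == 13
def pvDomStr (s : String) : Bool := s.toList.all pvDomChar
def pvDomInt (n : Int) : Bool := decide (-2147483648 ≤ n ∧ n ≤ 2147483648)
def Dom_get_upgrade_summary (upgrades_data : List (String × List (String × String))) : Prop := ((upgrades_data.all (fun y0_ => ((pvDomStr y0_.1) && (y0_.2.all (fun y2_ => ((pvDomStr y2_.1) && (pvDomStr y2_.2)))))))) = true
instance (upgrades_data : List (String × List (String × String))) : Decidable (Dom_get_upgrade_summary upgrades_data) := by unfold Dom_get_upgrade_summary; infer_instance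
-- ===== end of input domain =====

-- B replaces A's count-into-a-dict-then-sort-items strategy by sort-then-group: sort the
-- category list once, then one scan emits each maximal run and its length (objective: alternative).

-- ===== PORT A =====
-- str.capitalize(): first char upper-cased, the rest lower-cased (exact on the ASCII domain;
-- PySem.Chars.upper/lower are the Python case maps). Used by both Pythons' f-strings.
def pyCapitalize (s : String) : String :=
  String.ofList (match s.toList with
    | [] => []
    | c :: rest => PySem.Chars.upper [c] ++ PySem.Chars.lower rest)

-- upgrade_data['category'] (Pre_ guarantees the key is present, so getD never takes the default)
def pvCategoryOf (kv : String × List (String × String)) : String :=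
  (PySem.Dict.mk kv.2).getD "category" ""

def get_upgrade_summary (upgrades_data : List (String × List (String × String))) : String :=
  if upgrades_data = [] then "No upgrades completed"
  else
    -- for upgrade_data in upgrades_data.values(): category_counts[category] = .get(category,0)+1
    let category_counts : PySem.Dict String Int :=
      upgrades_data.foldl
        (fun d kv => d.insert (pvCategoryOf kv) (d.getD (pvCategoryOf kv) 0 + 1))
        PySem.Dict.empty
    let total : Int := upgrades_data.length
    let categories_str : String :=
      PySem.Str.join ", "
        ((PySem.List.sorted2 category_counts.items (fun p => p.1) (fun p => p.2)).map
          (fun p => pyCapitalize p.1 ++ ": " ++ PySem.Int.toStr p.2))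
    PySem.Int.toStr total ++ " upgrades (" ++ categories_str ++ ")"

-- ===== PORT B =====
-- the scan 'while i < n: j runs past the equal block; emit "Cat: j-i"; i = j' of Source B:
-- the inner while consumes the maximal run of elements equal to cats[i] (takeWhile on the
-- suffix), the outer loop resumes at j (dropWhile); recursion on the shrinking suffix.
def pvParts : List String → List String
  | [] => []
  | c :: rest =>
      (pyCapitalize c ++ ": " ++
        PySem.Int.toStr (((rest.takeWhile (fun x => x == c)).length : Int) + 1))
      :: pvParts (rest.dropWhile (fun x => x == c))
termination_by l => l.length
decreasing_by
  simpa using Nat.lt_succ_of_le (List.length_dropWhile_le _ _)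

def get_upgrade_summary_alt (upgrades_data : List (String × List (String × String))) : String :=
  if upgrades_data = [] then "No upgrades completed"
  else
    let cats : List String := PySem.List.sorted (upgrades_data.map pvCategoryOf) (fun x => x)
    PySem.Int.toStr (cats.length : Int) ++ " upgrades (" ++
      PySem.Str.join ", " (pvParts cats) ++ ")"

-- ===== PRECONDITION & SPEC =====
-- Pre_ excludes (a) entries whose inner dict lacks the 'category' key, on which A raises KeyError,
-- and (b) association lists with duplicate outer or inner keys, which cannot arise from a Python
-- dict (the dict literal collapses them, last value winning, while the list keeps both).
def Pre_get_upgrade_summary (upgrades_data : List (String × List (String × String))) : Prop :=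
  (upgrades_data.map (fun kv => kv.1)).Nodup ∧
  ∀ kv ∈ upgrades_data, "category" ∈ kv.2.map (fun p => p.1) ∧ (kv.2.map (fun p => p.1)).Nodup
instance (upgrades_data : List (String × List (String × String))) : Decidable (Pre_get_upgrade_summary upgrades_data) := by unfold Pre_get_upgrade_summary; infer_instance

def pvWitness_get_upgrade_summary : (List (String × List (String × String))) :=
  [("a", [("category", "weapons")]), ("b", [("category", "armor")])]

def Spec_get_upgrade_summary (upgrades_data : List (String × List (String × String))) (out : String) : Prop := out = get_upgrade_summary_alt upgrades_data
instance (upgrades_data : List (String × List (String × String))) (out : String) : Decidable (Spec_get_upgrade_summary upgrades_data out) := by unfold Spec_get_upgrade_summary; infer_instance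

-- ===== CLAIM (what is proved, stated in full; the proofs are below) =====
def Claim_equal_get_upgrade_summary : Prop := ∀ (upgrades_data : List (String × List (String × String))), Dom_get_upgrade_summary upgrades_data → Pre_get_upgrade_summary upgrades_data → Spec_get_upgrade_summary upgrades_data (get_upgrade_summary upgrades_data)

-- ===== LEMMAS AND PROOFS =====

-- the (category, run length) pairs pvParts formats, same recursion
def pvRuns : List String → List (String × Int)
  | [] => []
  | c :: rest =>
      (c, ((rest.takeWhile (fun x => x == c)).length : Int) + 1)
      :: pvRuns (rest.dropWhile (fun x => x == c))
termination_by l => l.length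
decreasing_by
  simpa using Nat.lt_succ_of_le (List.length_dropWhile_le _ _)

theorem pvParts_eq_map_runs (l : List String) :
    pvParts l = (pvRuns l).map
      (fun p => pyCapitalize p.1 ++ ": " ++ PySem.Int.toStr p.2) := by
  fun_induction pvParts l with
  | case1 => simp [pvRuns]
  | case2 c rest ih => rw [pvRuns, List.map_cons, ih]

-- on a sorted list, everything past the leading run of c is strictly greater than c
theorem pv_dropWhile_gt (c : String) (rest : List String)
    (hp : rest.Pairwise (· ≤ ·)) (hc : ∀ x ∈ rest, c ≤ x) :
    ∀ x ∈ rest.dropWhile (fun x => x == c), c < x := by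
  induction rest with
  | nil => simp
  | cons y ys ih =>
    rw [List.dropWhile_cons]
    split
    · exact ih hp.tail (fun x hx => hc x (by simp [hx]))
    · rename_i hy
      have hyne : c ≠ y := fun hh => hy (by simp [hh.symm])
      intro x hx
      rcases List.mem_cons.1 hx with rfl | hx
      · exact lt_of_le_of_ne (hc x (by simp)) hyne
      · exact lt_of_lt_of_le
          (lt_of_le_of_ne (hc y (by simp)) hyne)
          (List.rel_of_pairwise_cons hp hx)

-- core invariant of the run scan on a sorted list: keys = the distinct elements in
-- strictly increasing order, values = the multiplicities
theorem pv_runs_core (l : List String) (h : l.Pairwise (· ≤ ·)) :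
    (∀ x, x ∈ (pvRuns l).map Prod.fst ↔ x ∈ l) ∧
    ((pvRuns l).map Prod.fst).Pairwise (· < ·) ∧
    (∀ p ∈ pvRuns l, p.2 = (l.count p.1 : Int)) := by
  fun_induction pvRuns l with
  | case1 => simp
  | case2 c rest ih =>
    rw [List.pairwise_cons] at h
    obtain ⟨hc, hp⟩ := h
    have hd : ∀ x ∈ rest.dropWhile (fun x => x == c), c < x :=
      pv_dropWhile_gt c rest hp hc
    have hdp : (rest.dropWhile (fun x => x == c)).Pairwise (· ≤ ·) :=
      hp.sublist (List.dropWhile_sublist _)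
    obtain ⟨ihm, ihp, ihc⟩ := ih hdp
    have ht : ∀ x ∈ rest.takeWhile (fun x => x == c), x = c := by
      intro x hx
      simpa using List.mem_takeWhile_imp hx
    have hrest : rest = rest.takeWhile (fun x => x == c) ++ rest.dropWhile (fun x => x == c) :=
      (List.takeWhile_append_dropWhile).symm
    refine ⟨?_, ?_, ?_⟩
    · intro x
      rw [List.map_cons, List.mem_cons, ihm]
      constructor
      · rintro (rfl | hx)
        · exact List.mem_cons_self
        · have hxr : x ∈ rest := by rw [hrest]; exact List.mem_append_right _ hx
          exact List.mem_cons_of_mem _ hxr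
      · intro hx
        rcases List.mem_cons.1 hx with rfl | hx2
        · exact Or.inl rfl
        · rw [hrest] at hx2
          rcases List.mem_append.1 hx2 with h | h
          · exact Or.inl (ht x h)
          · exact Or.inr h
    · rw [List.map_cons, List.pairwise_cons]
      refine ⟨?_, ihp⟩
      intro k hk
      exact hd k ((ihm k).1 hk)
    · intro p hpmem
      rcases List.mem_cons.1 hpmem with rfl | hpmem
      · -- the head run: count of c in c :: take ++ drop
        have hnotd : (rest.dropWhile (fun x => x == c)).count c = 0 := by
          rw [List.count_eq_zero]
          intro hmem
          exact absurd rfl (ne_of_gt (hd c hmem))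
        have htake : (rest.takeWhile (fun x => x == c)).count c
            = (rest.takeWhile (fun x => x == c)).length := by
          rw [List.count_eq_length]
          intro x hx; exact ((ht x hx) ▸ rfl)
        have hcr : List.count c rest = (rest.takeWhile (fun x => x == c)).length := by
          conv_lhs => rw [hrest]
          rw [List.count_append, htake, hnotd]
          omega
        show ((rest.takeWhile (fun x => x == c)).length : Int) + 1
            = ((c :: rest).count c : Int)
        rw [List.count_cons_self, hcr]
        push_cast
        ring
      · have hk : p.1 ∈ rest.dropWhile (fun x => x == c) :=
          (ihm p.1).1 (List.mem_map.2 ⟨p, hpmem, rfl⟩)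
        have hne : p.1 ≠ c := ne_of_gt (hd p.1 hk)
        have hnt : (rest.takeWhile (fun x => x == c)).count p.1 = 0 := by
          rw [List.count_eq_zero]
          intro hmem
          exact hne (ht p.1 hmem)
        have h1 : (c :: rest).count p.1 = (rest.dropWhile (fun x => x == c)).count p.1 := by
          rw [List.count_cons_of_ne (Ne.symm hne)]
          conv_lhs => rw [hrest]
          rw [List.count_append, hnt, Nat.zero_add]
        rw [ihc p hpmem, h1]

-- the run scan of the sorted category list is exactly the sorted distinct categories
-- paired with their counts
theorem pv_runs_sorted (cats : List String) :
    pvRuns (PySem.List.sorted cats (fun x => x))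
      = (PySem.List.sorted (PySem.Set.ofList cats) (fun x => x)).map
          (fun k => (k, (cats.count k : Int))) := by
  have hsp : (PySem.List.sorted cats (fun x => x)).Pairwise (· ≤ ·) := by
    simpa using PySem.List.sorted_pairwise cats (fun x => x)
  obtain ⟨hm, hlt, hcnt⟩ := pv_runs_core _ hsp
  have hperm : (PySem.List.sorted cats (fun x => x)).Perm cats :=
    PySem.List.sorted_perm _ _ _
  have hkeys : PySem.List.sorted (PySem.Set.ofList cats) (fun x => x)
      = (pvRuns (PySem.List.sorted cats (fun x => x))).map Prod.fst := by
    apply PySem.List.sorted_eq_of_perm_of_pairwise_lt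
    · rw [List.perm_ext_iff_of_nodup (hlt.imp ne_of_lt) (PySem.Set.nodup_ofList cats)]
      intro x
      rw [hm x, PySem.Set.mem_ofList, PySem.List.mem_sorted]
    · simpa using hlt
  rw [hkeys, List.map_map]
  nth_rewrite 1 [show pvRuns (PySem.List.sorted cats (fun x => x))
      = (pvRuns (PySem.List.sorted cats (fun x => x))).map id from (List.map_id _).symm]
  apply List.map_congr_left
  intro p hp
  have h2 : p.2 = ((PySem.List.sorted cats (fun x => x)).count p.1 : Int) := hcnt p hp
  rw [hperm.count_eq] at h2
  simp [Prod.ext_iff, h2]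

-- inserting with two comparators that agree on the inserted element vs the list elements
theorem pv_insertBy_congr {α : Type} (lt lt' : α → α → Bool) (x : α) (ys : List α)
    (h : ∀ y ∈ ys, lt x y = lt' x y) :
    PySem.List.insertBy lt x ys = PySem.List.insertBy lt' x ys := by
  induction ys with
  | nil => rfl
  | cons y ys ih =>
    simp only [PySem.List.insertBy]
    rw [h y (by simp)]
    split
    · rfl
    · rw [ih (fun z hz => h z (by simp [hz]))]

-- an insertion-sort fold is unchanged when the comparators agree on all involved elements
theorem pv_foldl_insertBy_congr {α : Type} (P : α → Prop) (lt lt' : α → α → Bool)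
    (h : ∀ a b, P a → P b → lt a b = lt' a b) (xs acc : List α)
    (hacc : ∀ y ∈ acc, P y) (hxs : ∀ x ∈ xs, P x) :
    xs.foldl (fun acc x => PySem.List.insertBy lt x acc) acc
      = xs.foldl (fun acc x => PySem.List.insertBy lt' x acc) acc := by
  induction xs generalizing acc with
  | nil => rfl
  | cons x xs ih =>
    simp only [List.foldl_cons]
    rw [pv_insertBy_congr lt lt' x acc
        (fun y hy => h x y (hxs x (by simp)) (hacc y hy))]
    exact ih _ (fun y hy => by
        rcases (PySem.List.mem_insertBy _ _ _ _).1 hy with rfl | hy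
        · exact hxs y (by simp)
        · exact hacc y hy)
      (fun z hz => hxs z (by simp [hz]))

-- on pairs with pairwise-distinct first components, Python's tuple sort is the sort by first component
theorem pv_sorted2_eq_sorted_fst (xs : List (String × Int))
    (hinj : ∀ a ∈ xs, ∀ b ∈ xs, a.1 = b.1 → a = b) :
    PySem.List.sorted2 xs (fun p => p.1) (fun p => p.2)
      = PySem.List.sorted xs (fun p => p.1) := by
  simp only [PySem.List.sorted2, PySem.List.sorted, if_neg (by simp : ¬ (false = true))]
  exact pv_foldl_insertBy_congr (fun a => a ∈ xs) _ _
    (fun a b ha hb => by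
      rcases lt_trichotomy a.1 b.1 with hlt | heq | hgt
      · simp [hlt]
      · have : a = b := hinj a ha b hb heq
        subst this
        simp
      · simp [hgt, not_lt.2 (le_of_lt hgt)])
    xs [] (by simp) (fun x hx => hx)

-- the sorted items of A's counter are exactly the (sorted distinct category, count) pairs
theorem pv_sorted_counter_items (cats : List String) :
    PySem.List.sorted2 (PySem.Dict.counter cats).items (fun p => p.1) (fun p => p.2)
      = (PySem.List.sorted (PySem.Set.ofList cats) (fun x => x)).map
          (fun k => (k, (cats.count k : Int))) := by
  rw [PySem.Dict.items_counter]
  rw [pv_sorted2_eq_sorted_fst _ (by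
    intro a ha b hb h1
    simp only [List.mem_map] at ha hb
    rcases ha with ⟨ka, -, rfl⟩
    rcases hb with ⟨kb, -, rfl⟩
    simp only at h1
    simp [h1])]
  apply PySem.List.sorted_eq_of_perm_of_pairwise_lt
  · exact List.Perm.map _ (PySem.List.sorted_perm _ _ _)
  · exact List.Pairwise.map _ (fun a b h => h) (PySem.List.sorted_ofList_pairwise_lt cats)

-- ===== VERDICT (by name: the statement is the Claim_ definition above) =====
theorem get_upgrade_summary_spec : Claim_equal_get_upgrade_summary := by
  intro ud _ _
  unfold Spec_get_upgrade_summary get_upgrade_summary get_upgrade_summary_alt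
  by_cases hnil : ud = []
  · simp [hnil]
  · simp only [if_neg hnil]
    have hfold : ud.foldl
        (fun d kv => d.insert (pvCategoryOf kv) (d.getD (pvCategoryOf kv) 0 + 1))
        PySem.Dict.empty = PySem.Dict.counter (ud.map pvCategoryOf) := by
      rw [← PySem.Dict.foldl_insert_getD_add_one_eq_counter, List.foldl_map]
    have hlen : ((PySem.List.sorted (ud.map pvCategoryOf) (fun x => x)).length : Int)
        = (ud.length : Int) := by
      rw [PySem.List.length_sorted, List.length_map]
    rw [hfold, pv_sorted_counter_items, hlen, pvParts_eq_map_runs, pv_runs_sorted,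
      List.map_map]
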